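-- pv_equiv track=rewrite | github.com/losamyn/aoc2025 | 03.py | part2
-- ===== SOURCE A (Python) =====
-- def part2(inp: str) -> int:
--     result = 0
--     for bank in inp.split():
--         joltage = ""
--         for i_bat in range(-11, 1):
--             possible_bats = bank[:i_bat] if i_bat < 0 else bank
--             next_bat = max(possible_bats)
--             bank = bank[bank.find(next_bat) + 1 :]
--             joltage = joltage + next_bat
--         result += int(joltage)
--
--     return result
-- ===== SOURCE B (Python) =====
-- def part2(inp: str) -> int:
--     total = 0
--     for bank in inp.split():
--         n = len(bank)
--         stack = []
--         for i, c in enumerate(bank):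
--             while stack and stack[-1] < c and len(stack) + (n - i) > 12:
--                 stack.pop()
--             stack.append(c)
--         total += int("".join(stack[:12]))
--     return total
-- ===== Notes on version B (the rewrite author's own statement) =====
-- stated objective: alternative
-- what changed: Each bank's greedy 12-digit maximum subsequence is built in one left-to-right monotonic-stack pass (pop smaller tops while enough characters remain to refill to 12) instead of twelve repeated max()+find()+reslice scans.
-- outside the precondition, e.g. on part2('+99999999999'): A returns 99999999999, B returns 99999999999
import Mathlib
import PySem

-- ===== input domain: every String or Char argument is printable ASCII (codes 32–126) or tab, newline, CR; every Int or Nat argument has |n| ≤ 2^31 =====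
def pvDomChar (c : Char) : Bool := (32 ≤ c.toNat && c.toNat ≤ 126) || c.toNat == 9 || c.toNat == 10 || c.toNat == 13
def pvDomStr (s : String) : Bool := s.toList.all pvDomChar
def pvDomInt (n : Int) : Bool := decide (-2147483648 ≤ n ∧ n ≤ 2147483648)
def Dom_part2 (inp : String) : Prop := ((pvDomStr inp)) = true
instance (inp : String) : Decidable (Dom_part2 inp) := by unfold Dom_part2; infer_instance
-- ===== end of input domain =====

-- B replaces A's twelve max/find/reslice scans per bank by one left-to-right monotonic-stack pass over the bank.

-- ===== PORT A =====
-- A's inner loop per bank, at the List Char level (Python str ops ported via PySem.Chars):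
-- joltage accumulation over range(-11, 1); max("") raising and int() raising are the
-- `none` branches (unreachable under Pre_, where `.getD 0` / keeping state never fires).
def part2Bank (bank0 : List Char) : List Char :=
  ((PySem.List.pyRange (-11) 1 1).foldl
    (fun (st : List Char × List Char) i_bat =>
      let joltage := st.1
      let bank := st.2
      let possible := if i_bat < 0 then PySem.List.slice bank none (some i_bat) else bank
      match PySem.List.max? possible (fun c => c) with
      | none => (joltage, bank)      -- Python: max() of empty sequence raises ValueError
      | some nb =>
          (joltage ++ [nb],
           PySem.List.slice bank (some (PySem.Chars.find bank [nb] + 1)) none))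
    ([], bank0)).1

def part2 (inp : String) : Int :=
  (PySem.Str.split₀ inp).foldl
    (fun result bank =>
      result + (PySem.Int.ofChars? (part2Bank bank.toList)).getD 0)  -- int() raising = none, unreachable under Pre_
    0

-- ===== PORT B =====
-- B's inner `while stack and stack[-1] < c and len(stack) + (n - i) > 12: stack.pop()`;
-- the stack is held TOP-FIRST (head = top of Source B's list), so stack[:12] = reverse-then-take.
def popB (c : Char) (r : Int) : List Char → List Char
  | [] => []
  | d :: u => if d < c ∧ ((u.length : Int) + 1) + r > 12 then popB c r u else d :: u

def part2_alt (inp : String) : Int :=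
  (PySem.Str.split₀ inp).foldl
    (fun total bank =>
      let cs := bank.toList
      let n := cs.length
      let stack := (PySem.List.enumerate cs 0).foldl
        (fun (stack : List Char) ic => ic.2 :: popB ic.2 ((n : Int) - ic.1) stack) []
      total + (PySem.Int.ofChars? (stack.reverse.take 12)).getD 0)
    0

-- ===== PRECONDITION & SPEC =====
-- Pre_ excludes inputs where A raises: banks shorter than 12 characters (max of an empty
-- slice, ValueError) and non-digit characters (int() on the selected 12 characters,
-- ValueError) — except for exotic numeric banks such as '+99999999999', where A happens
-- to return; those are excluded too although A returns there (B returns the same value).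
def Pre_part2 (inp : String) : Prop :=
  (inp.toList.all
    (fun c => PySem.Chars.isdigit c || c == ' ' || c == '\t' || c == '\n' || c == '\r') = true) ∧
  ((PySem.Str.split₀ inp).all (fun bank => decide (12 ≤ bank.toList.length)) = true)
instance (inp : String) : Decidable (Pre_part2 inp) := by unfold Pre_part2; infer_instance

def pvWitness_part2 : String := "987654321111 811111111111"

def Spec_part2 (inp : String) (out : Int) : Prop := out = part2_alt inp
instance (inp : String) (out : Int) : Decidable (Spec_part2 inp out) := by unfold Spec_part2; infer_instance

-- ===== CLAIM (what is proved, stated in full; the proofs are below) =====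
def Claim_equal_part2 : Prop := ∀ (inp : String), Dom_part2 inp → Pre_part2 inp → Spec_part2 inp (part2 inp)

-- ===== LEMMAS AND PROOFS =====

-- Proof-side greedy recursion: with k picks remaining on s, pick the first maximum of
-- the window s.take (s.length - (k-1)) and recurse past its first occurrence.
def greedy : Nat → List Char → List Char
  | 0, _ => []
  | (k+1), s =>
    match PySem.List.max? (s.take (s.length - k)) (fun c => c) with
    | none => []
    | some m =>
      match PySem.List.index? s m with
      | none => []
      | some j => m :: greedy k (s.drop (j+1))

-- Proof-side stack run with Nat slack bookkeeping: r = number of input chars remaining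
-- including the current one, plus a fixed offset `off` of chars still to come later.
def popS (k : Nat) (c : Char) (r : Nat) : List Char → List Char
  | [] => []
  | d :: u => if d < c ∧ k < u.length + 1 + r then popS k c r u else d :: u

def runO (k off : Nat) : List Char → List Char → List Char
  | st, [] => st
  | st, c :: t => runO k off (c :: popS k c (t.length + 1 + off) st) t

-- H K m t: every char of t still inside the global window is ≤ m.
def Hm (K : Nat) (m : Char) (t : List Char) : Prop :=
  ∀ u c v, t = u ++ c :: v → K + 1 < v.length + 2 → c ≤ m

theorem max?_of_ne_nil (s : List Char) (h : s ≠ []) :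
    ∃ m, PySem.List.max? s (fun c => c) = some m := by
  cases hcase : PySem.List.max? s (fun c => c) with
  | none => exact absurd ((PySem.List.max?_eq_none_iff _ _).1 hcase) h
  | some m => exact ⟨m, rfl⟩

theorem popS_subset {k : Nat} {c : Char} {r : Nat} {st : List Char} {x : Char}
    (hx : x ∈ popS k c r st) : x ∈ st := by
  induction st with
  | nil => simpa [popS] using hx
  | cons d u ih =>
    simp only [popS] at hx
    split at hx
    · exact List.mem_cons_of_mem _ (ih hx)
    · exact hx

theorem runO_subset {k off : Nat} (l : List Char) (st : List Char) {x : Char}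
    (hx : x ∈ runO k off st l) : x ∈ st ∨ x ∈ l := by
  induction l generalizing st with
  | nil => simp only [runO] at hx; exact Or.inl hx
  | cons c t ih =>
    simp only [runO] at hx
    rcases ih _ hx with h | h
    · rcases List.mem_cons.1 h with rfl | h
      · exact Or.inr (List.mem_cons_self ..)
      · exact Or.inl (popS_subset h)
    · exact Or.inr (List.mem_cons_of_mem _ h)

theorem popS_all_lt {k : Nat} {c : Char} {r : Nat} {st : List Char}
    (hlt : ∀ d ∈ st, d < c) (hr : k ≤ r) : popS k c r st = [] := by
  induction st with
  | nil => rfl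
  | cons d u ih =>
    simp only [popS]
    rw [if_pos ⟨hlt d (List.mem_cons_self ..), by omega⟩]
    exact ih (fun d hd => hlt d (List.mem_cons_of_mem _ hd))

theorem runO_append (k off : Nat) (st : List Char) (a t : List Char) :
    runO k off st (a ++ t) = runO k off (runO k (t.length + off) st a) t := by
  induction a generalizing st with
  | nil => simp [runO]
  | cons c a ih =>
    have harith : (a ++ t).length + 1 + off = a.length + 1 + (t.length + off) := by
      simp; omega
    calc runO k off st (c :: a ++ t)
        = runO k off (c :: popS k c ((a ++ t).length + 1 + off) st) (a ++ t) := rfl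
      _ = runO k off (c :: popS k c (a.length + 1 + (t.length + off)) st) (a ++ t) := by
          rw [harith]
      _ = runO k off (runO k (t.length + off) (c :: popS k c (a.length + 1 + (t.length + off)) st) a) t := ih _
      _ = runO k off (runO k (t.length + off) st (c :: a)) t := rfl

-- Processing a prefix of chars all < m and then m itself, with ≥ k chars still to come,
-- leaves exactly the stack [m].
theorem runO_prefix (k off : Nat) (u : List Char) (m : Char)
    (hu : ∀ d ∈ u, d < m) (hoff : k ≤ off + 1) :
    runO k off [] (u ++ [m]) = [m] := by
  have h1 : runO k off [] (u ++ [m]) = runO k off (runO k (1 + off) [] u) [m] := by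
    simpa using runO_append k off [] u [m]
  rw [h1]
  simp only [runO]
  rw [popS_all_lt (fun d hd => by
        rcases runO_subset u [] hd with h | h
        · simp at h
        · exact hu d h)
      (by omega)]

theorem Hm_tail {K : Nat} {m c : Char} {t : List Char} (h : Hm K m (c :: t)) : Hm K m t :=
  fun u c' v hv hlen => h (c :: u) c' v (by simp [hv]) hlen

theorem popS_bottom {K : Nat} {m c : Char} {r : Nat} (st' : List Char) (t : List Char)
    (ht : Hm K m (c :: t)) (hr : r = t.length + 1) :
    popS (K+1) c r (st' ++ [m]) = popS K c r st' ++ [m] := by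
  induction st' with
  | nil =>
    simp only [List.nil_append, popS]
    rw [if_neg]
    rintro ⟨hmc, hlen⟩
    have := ht [] c t rfl (by simp at hlen ⊢; omega)
    exact absurd hmc (not_lt.2 this)
  | cons d w ih =>
    simp only [List.cons_append, popS]
    have hlen : (w ++ [m]).length = w.length + 1 := by simp
    by_cases hg : d < c ∧ K < w.length + 1 + r
    · rw [if_pos (show d < c ∧ K + 1 < (w ++ [m]).length + 1 + r by
        rw [hlen]; exact ⟨hg.1, by omega⟩), if_pos hg, ih]
    · rw [if_neg (show ¬(d < c ∧ K + 1 < (w ++ [m]).length + 1 + r) by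
        rw [hlen]; rintro ⟨h1, h2⟩; exact hg ⟨h1, by omega⟩), if_neg hg, List.cons_append]

theorem runO_rem {K : Nat} {m : Char} (t : List Char) (st' : List Char)
    (ht : Hm K m t) :
    runO (K+1) 0 (st' ++ [m]) t = runO K 0 st' t ++ [m] := by
  induction t generalizing st' with
  | nil => simp [runO]
  | cons c t ih =>
    simp only [runO]
    rw [popS_bottom st' t ht (by omega), ← List.cons_append, ih _ (Hm_tail ht)]

theorem index?_lt_of_mem_take {s : List Char} {m : Char} {j w : Nat}
    (hj : PySem.List.index? s m = some j) (hm : m ∈ s.take w) : j < w := by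
  rcases (PySem.List.index?_eq_some_iff _ _ _).1 hj with ⟨pre, suf, rfl, hlen, hnm⟩
  by_contra hge
  rw [not_lt] at hge
  have hw : w ≤ pre.length := by omega
  rw [List.take_append_of_le_length hw] at hm
  exact hnm (List.mem_of_mem_take hm)

theorem find_singleton_eq_index? {s : List Char} {m : Char} {j : Nat}
    (hj : PySem.List.index? s m = some j) :
    PySem.Chars.find s [m] = (j : Int) := by
  obtain ⟨hjlen, hsj, hmin⟩ := PySem.List.getElem_of_index?_eq_some hj
  have hmem : m ∈ s := (PySem.List.index?_isSome_iff _ _).1 (by rw [hj]; rfl)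
  have hinf : [m] <:+: s := by
    rcases List.mem_iff_append.1 hmem with ⟨pre, suf, rfl⟩
    exact ⟨pre, suf, by simp⟩
  have hpos : (0 : Int) ≤ PySem.Chars.find s [m] := (PySem.Chars.find_nonneg_iff _ _).2 hinf
  obtain ⟨hpre, hminf⟩ := PySem.Chars.find_spec hpos
  set f := (PySem.Chars.find s [m]).toNat with hf
  have hsf : s[f]? = some m := by
    rcases hpre with ⟨rest, hrest⟩
    have : (s.drop f).head? = some m := by rw [← hrest]; rfl
    rwa [List.head?_drop] at this
  have hfj : f = j := by
    rcases lt_trichotomy f j with h | h | h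
    · exact absurd (by rw [List.getElem?_eq_getElem (by omega)] at hsf; exact Option.some.inj hsf)
        (hmin f h)
    · exact h
    · exfalso
      apply hminf j h
      refine ⟨s.drop (j+1), ?_⟩
      have : s.drop j = m :: s.drop (j+1) := by
        rw [List.drop_eq_getElem_cons hjlen, hsj]
      rw [this]; rfl
  omega

-- Key lemma: the monotonic-stack pass computes the greedy subsequence.
theorem runO_eq_greedy : ∀ (k : Nat) (s : List Char), k ≤ s.length →
    (runO k 0 [] s).reverse.take k = greedy k s := by
  intro k
  induction k with
  | zero => intro s _; simp [greedy]
  | succ k ih =>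
    intro s hk
    have hwin : s.take (s.length - k) ≠ [] := by
      intro h; have := congrArg List.length h; simp at this; omega
    obtain ⟨m, hm⟩ := max?_of_ne_nil _ hwin
    have hmem : m ∈ s.take (s.length - k) := PySem.List.max?_mem hm
    have hmemS : m ∈ s := List.mem_of_mem_take hmem
    obtain ⟨j, hj⟩ := Option.isSome_iff_exists.1 ((PySem.List.index?_isSome_iff _ _).2 hmemS)
    have hjw : j < s.length - k := index?_lt_of_mem_take hj hmem
    obtain ⟨hjlen, hsj, hmin⟩ := PySem.List.getElem_of_index?_eq_some hj
    -- split s = take j ++ [m] ++ drop (j+1)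
    have hsplit : s = s.take j ++ [m] ++ s.drop (j+1) := by
      rw [List.append_assoc, List.singleton_append, ← hsj, ← List.drop_eq_getElem_cons hjlen,
        List.take_append_drop]
    have hlt : ∀ d ∈ s.take j, d < m := by
      intro d hd
      rcases List.mem_take_iff_getElem.1 hd with ⟨i, hi, rfl⟩
      have hiw : i < s.length - k := by omega
      have hle : s[i] ≤ m := by
        have := PySem.List.max?_isMax hm s[i] (List.mem_take_iff_getElem.2 ⟨i, by omega, rfl⟩)
        simpa using this
      have hne : s[i] ≠ m := hmin i (by omega)
      exact lt_of_le_of_ne hle hne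
    have hHm : Hm k m (s.drop (j+1)) := by
      intro u c v hv hlen
      have hvlen : (s.drop (j+1)).length = s.length - (j+1) := by simp
      have hiw : j + 1 + u.length < s.length - k := by
        have := congrArg List.length hv
        simp at this hvlen
        omega
      have hc : c = s[j + 1 + u.length]'(by omega) := by
        have : (s.drop (j+1))[u.length]? = some c := by
          rw [hv]; simp
        rw [List.getElem?_drop] at this
        rw [List.getElem?_eq_getElem (by omega)] at this
        exact (Option.some.inj this).symm
      rw [hc]
      have := PySem.List.max?_isMax hm (s[j + 1 + u.length]'(by omega))
        (List.mem_take_iff_getElem.2 ⟨j + 1 + u.length, by omega, rfl⟩)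
      simpa using this
    have hrun : runO (k+1) 0 [] s = runO k 0 [] (s.drop (j+1)) ++ [m] := by
      conv_lhs => rw [hsplit]
      rw [runO_append]
      have hpre : runO (k+1) ((s.drop (j+1)).length + 0) [] (s.take j ++ [m]) = [m] := by
        apply runO_prefix _ _ _ _ hlt
        simp
        omega
      rw [hpre, ← List.nil_append [m]]
      exact runO_rem (s.drop (j+1)) [] hHm
    rw [hrun]
    simp only [greedy, hm, hj, List.reverse_append, List.reverse_cons, List.reverse_nil,
      List.nil_append, List.take_succ_cons, List.singleton_append]
    rw [ih (s.drop (j+1)) (show k ≤ (s.drop (j+1)).length by rw [List.length_drop]; omega)]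

-- A's per-bank loop computes `greedy`.
theorem part2Bank_loop : ∀ (k : Nat) (jol s : List Char), k ≤ 12 → k ≤ s.length →
    (((PySem.List.pyRange (1 - (k : Int)) 1 1).foldl
      (fun (st : List Char × List Char) i_bat =>
        let joltage := st.1
        let bank := st.2
        let possible := if i_bat < 0 then PySem.List.slice bank none (some i_bat) else bank
        match PySem.List.max? possible (fun c => c) with
        | none => (joltage, bank)
        | some nb =>
            (joltage ++ [nb],
             PySem.List.slice bank (some (PySem.Chars.find bank [nb] + 1)) none))
      (jol, s)).1) = jol ++ greedy k s := by
  intro k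
  induction k with
  | zero =>
    intro jol s _ _
    rw [PySem.List.pyRange_one_eq_nil (by omega)]
    simp [greedy]
  | succ k ih =>
    intro jol s hk12 hks
    rw [PySem.List.pyRange_one_cons (by omega)]
    simp only [List.foldl_cons]
    have hposs : (if (1 - ((k:Int)+1)) < 0 then
        PySem.List.slice s none (some (1 - ((k:Int)+1))) else s) = s.take (s.length - k) := by
      rcases Nat.eq_zero_or_pos k with rfl | hpos
      · norm_num
      · rw [if_pos (by omega)]
        have : (1 - ((k:Int)+1)) = -(k : Int) := by ring
        rw [this, PySem.List.slice_to_neg_natCast _ _ hpos]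
    have hwin : s.take (s.length - k) ≠ [] := by
      intro h; have := congrArg List.length h; simp at this; omega
    obtain ⟨m, hm⟩ := max?_of_ne_nil _ hwin
    have hmem : m ∈ s.take (s.length - k) := PySem.List.max?_mem hm
    have hmemS : m ∈ s := List.mem_of_mem_take hmem
    obtain ⟨j, hj⟩ := Option.isSome_iff_exists.1 ((PySem.List.index?_isSome_iff _ _).2 hmemS)
    have hjw : j < s.length - k := index?_lt_of_mem_take hj hmem
    have hfind : PySem.Chars.find s [m] = (j : Int) := find_singleton_eq_index? hj
    have hdrop : PySem.List.slice s (some (PySem.Chars.find s [m] + 1)) none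
        = s.drop (j+1) := by
      rw [hfind, PySem.List.slice_from s (show (0:Int) ≤ (j:Int) + 1 by omega)]
      congr 1
    have hstep : (1 : Int) - ((k:Int)+1) + 1 = 1 - (k:Int) := by ring
    push_cast
    simp only [hposs, hm, hdrop]
    rw [hstep, ih (jol ++ [m]) (s.drop (j+1)) (by omega)
      (show k ≤ (s.drop (j+1)).length by rw [List.length_drop]; omega)]
    simp only [greedy, hm, hj]
    simp

theorem part2Bank_eq_greedy (bank : List Char) (h : 12 ≤ bank.length) :
    part2Bank bank = greedy 12 bank := by
  have := part2Bank_loop 12 [] bank (by omega) h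
  norm_num at this
  unfold part2Bank
  norm_num
  exact this

-- B's per-bank fold is `runO 12 0`.
theorem popB_eq_popS (c : Char) (r : Nat) (st : List Char) :
    popB c ((r : Int)) st = popS 12 c r st := by
  induction st with
  | nil => rfl
  | cons d u ih =>
    simp only [popB, popS]
    by_cases hg : d < c ∧ 12 < u.length + 1 + r
    · rw [if_pos (⟨hg.1, by have := hg.2; push_cast; omega⟩ :
        d < c ∧ ((u.length : Int) + 1) + (r : Int) > 12), if_pos hg, ih]
    · rw [if_neg (fun hh => hg ⟨hh.1, by omega⟩), if_neg hg]

theorem altFold_eq_runO (N : Nat) : ∀ (t : List Char) (i₀ : Nat) (st : List Char),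
    N = i₀ + t.length →
    (PySem.List.enumerate t (i₀ : Int)).foldl
      (fun (st : List Char) ic => ic.2 :: popB ic.2 ((N : Int) - ic.1) st) st
    = runO 12 0 st t := by
  intro t
  induction t with
  | nil => intro i₀ st _; rfl
  | cons c t ih =>
    intro i₀ st hN
    rw [PySem.List.enumerate_cons]
    simp only [List.foldl_cons, runO]
    have hr : (N : Int) - (i₀ : Int) = ((t.length + 1 + 0 : Nat) : Int) := by
      simp at hN ⊢; omega
    rw [hr, popB_eq_popS]
    have : ((i₀ : Int) + 1) = (((i₀ + 1 : Nat)) : Int) := by push_cast; ring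
    rw [this, ih (i₀ + 1) _ (by simp at hN ⊢; omega)]

theorem bank_eq (bank : List Char) (h : 12 ≤ bank.length) :
    part2Bank bank =
      ((PySem.List.enumerate bank 0).foldl
        (fun (st : List Char) ic => ic.2 :: popB ic.2 ((bank.length : Int) - ic.1) st)
        []).reverse.take 12 := by
  have h0 : ((0 : Nat) : Int) = (0 : Int) := rfl
  rw [← h0, altFold_eq_runO bank.length bank 0 [] (by omega)]
  rw [runO_eq_greedy 12 bank h, part2Bank_eq_greedy bank h]

-- ===== VERDICT (by name: the statement is the Claim_ definition above) =====
theorem part2_spec : Claim_equal_part2 := by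
  intro inp _ hpre
  unfold Spec_part2 part2 part2_alt
  apply PySem.List.foldl_congr_mem
  intro acc bank hbank
  have hlen : 12 ≤ bank.toList.length := of_decide_eq_true (List.all_eq_true.mp hpre.2 bank hbank)
  simp only []
  rw [bank_eq bank.toList hlen]
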